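-- pv_equiv track=rewrite | github.com/Near-River/Algorithm | fundamental/breadth_first_search/catch_that_cow.py | catch_that_cow
-- ===== SOURCE A (Python) =====
-- from queue import Queue
--
-- def catch_that_cow(N, K):
--     """
--     :type N: int
--     :type K: int
--     :rtype: int
--     """
--     MaxBoard = 100000
--     visited = {}
--     queue = Queue()
--     queue.put((N, 0))
--     visited[N] = True
--     while not queue.empty():
--         idx, step = queue.get()
--         if idx == K: return step
--         if idx - 1 >= 0 and (idx - 1) not in visited:
--             queue.put((idx - 1, step + 1))
--             visited[idx - 1] = True
--         if idx + 1 <= MaxBoard and (idx + 1) not in visited: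
--             queue.put((idx + 1, step + 1))
--             visited[idx + 1] = True
--         if 2 * idx <= MaxBoard and 2 * idx not in visited:
--             queue.put((2 * idx, step + 1))
--             visited[2 * idx] = True
--     return -1
-- ===== SOURCE B (Python) =====
-- def catch_that_cow(N, K):
--     # Greedy/recursive backward computation instead of BFS over the 100000-board.
--     if 0 <= K <= N:
--         return N - K
--     if K < 0 or K > 100000:
--         return -1
--     return _cost(N, K)
--
-- def _cost(N, K):
--     # exact minimal number of moves from N up to K, 0 <= N < K <= 100000
--     if K <= N:
--         return N - K
--     if K == 1:
--         return 1
--     if K % 2 == 0: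
--         return min(K - N, 1 + _cost(N, K // 2))
--     return 1 + min(_cost(N, K - 1), 1 + _cost(N, (K + 1) // 2))
-- ===== Notes on version B (the rewrite author's own statement) =====
-- stated objective: faster
-- what changed: Replaces the breadth-first search over the 0..100000 board (queue + visited dict) with a closed backward recursion from K (halve even targets, resolve odd ones via their even neighbours), so the answer is computed in O(log K) arithmetic steps instead of exploring the board.
-- outside the precondition, e.g. on catch_that_cow(-2, 3): A returns 5, B returns 3
import Mathlib
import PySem

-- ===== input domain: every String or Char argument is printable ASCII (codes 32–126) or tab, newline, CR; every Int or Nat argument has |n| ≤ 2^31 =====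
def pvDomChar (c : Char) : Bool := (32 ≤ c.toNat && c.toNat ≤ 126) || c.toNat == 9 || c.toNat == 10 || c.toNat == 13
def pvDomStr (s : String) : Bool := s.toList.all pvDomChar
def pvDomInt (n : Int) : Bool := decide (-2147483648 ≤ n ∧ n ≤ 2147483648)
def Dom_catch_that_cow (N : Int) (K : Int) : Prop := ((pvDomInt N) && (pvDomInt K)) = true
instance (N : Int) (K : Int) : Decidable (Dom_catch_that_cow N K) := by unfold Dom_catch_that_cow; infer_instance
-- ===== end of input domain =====

-- B replaces A's breadth-first search over the 0..100000 board with an O(log K)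
-- backward recursion from K; proved to return the same value for every N ≥ 0.


-- ===== PORT A =====
-- A's while-loop over the FIFO queue; fuel totalizes the loop (4*(max N 100000 + 2)
-- iterations are proved sufficient on the stated domain N ≥ 0).
-- one `if cond and (w not in visited): queue.put(...); visited[w] = True` block of A
def cowPush (q : List (Int × Int)) (V : Std.HashMap Int Bool) (cond : Prop) [Decidable cond]
    (w lab : Int) : List (Int × Int) × Std.HashMap Int Bool :=
  if cond ∧ V.contains w = false then (q ++ [(w, lab)], V.insert w true) else (q, V)

-- `visited` is a dict used only through key membership (its True values are never
-- read) and is never iterated: it is ported as a hash map, Python-dict style.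
def cowLoop : Nat → List (Int × Int) → Std.HashMap Int Bool → Int → Int
  | 0, _, _, _ => -1
  | _ + 1, [], _, _ => -1
  | fuel + 1, (idx, step) :: rest, visited, K =>
    if idx = K then step
    else
      let s1 := cowPush rest visited (0 ≤ idx - 1) (idx - 1) (step + 1)
      let s2 := cowPush s1.1 s1.2 (idx + 1 ≤ 100000) (idx + 1) (step + 1)
      let s3 := cowPush s2.1 s2.2 (2 * idx ≤ 100000) (2 * idx) (step + 1)
      cowLoop fuel s3.1 s3.2 K

def catch_that_cow (N : Int) (K : Int) : Int :=
  cowLoop (4 * ((max N 100000).toNat + 2)) [(N, 0)] ((∅ : Std.HashMap Int Bool).insert N true) K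

-- ===== PORT B =====
-- Source B's `_cost`; fuel totalizes the recursion (depth K.toNat + 1 suffices on 0 ≤ N < K).
def cowCost (N : Int) : Nat → Int → Int
  | 0, _ => 0
  | fuel + 1, K =>
    if K ≤ N then N - K
    else if K = 1 then 1
    else if PySem.Int.mod K 2 = 0 then min (K - N) (1 + cowCost N fuel (PySem.Int.floordiv K 2))
    else 1 + min (cowCost N fuel (K - 1)) (1 + cowCost N fuel (PySem.Int.floordiv (K + 1) 2))

def catch_that_cow_alt (N : Int) (K : Int) : Int :=
  if 0 ≤ K ∧ K ≤ N then N - K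
  else if K < 0 ∨ 100000 < K then -1
  else cowCost N (K.toNat + 1) K

-- ===== PRECONDITION & SPEC =====
-- Pre_ excludes N < 0, off the puzzle's 0..100000 board: there A's missing lower guard
-- makes it wander through unboundedly negative positions (exponentially many states,
-- diverging when K > 100000) — an artefact of the missing input validation, not a
-- behaviour of the stated game; B's greedy recursion does not model that region.
def Pre_catch_that_cow (N : Int) (_K : Int) : Prop := 0 ≤ N
instance (N : Int) (K : Int) : Decidable (Pre_catch_that_cow N K) := by unfold Pre_catch_that_cow; infer_instance
def pvWitness_catch_that_cow : Int × Int := (5, 17)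

def Spec_catch_that_cow (N : Int) (K : Int) (out : Int) : Prop := out = catch_that_cow_alt N K
instance (N : Int) (K : Int) (out : Int) : Decidable (Spec_catch_that_cow N K out) := by unfold Spec_catch_that_cow; infer_instance

-- ===== CLAIM (what is proved, stated in full; the proofs are below) =====
def Claim_equal_catch_that_cow : Prop := ∀ (N : Int) (K : Int), Dom_catch_that_cow N K → Pre_catch_that_cow N K → Spec_catch_that_cow N K (catch_that_cow N K)

-- ===== LEMMAS AND PROOFS =====

-- The move graph of A: from v one may go to v-1 (if ≥ 0), v+1 (if ≤ 100000), 2v (if ≤ 100000).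
def cowStep (v w : Int) : Prop :=
  (w = v - 1 ∧ 0 ≤ w) ∨ (w = v + 1 ∧ w ≤ 100000) ∨ (w = 2 * v ∧ w ≤ 100000)

def reachIn : Nat → Int → Int → Prop
  | 0, a, b => a = b
  | n + 1, a, b => ∃ c, cowStep a c ∧ reachIn n c b

def cowReach (a b : Int) : Prop := ∃ n, reachIn n a b

noncomputable def cowDist (a b : Int) : Nat := sInf {n | reachIn n a b}

-- Basic facts about reachIn / cowDist

lemma reachIn_zero {a b : Int} (h : reachIn 0 a b) : a = b := h

lemma reachIn_self (a : Int) : reachIn 0 a a := rfl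

lemma reachIn_snoc : ∀ (n : Nat) (a b : Int),
    reachIn (n + 1) a b ↔ ∃ c, reachIn n a c ∧ cowStep c b := by
  intro n
  induction n with
  | zero =>
    intro a b
    constructor
    · rintro ⟨c, hs, hr⟩; exact ⟨a, rfl, by cases (reachIn_zero hr); exact hs⟩
    · rintro ⟨c, hr, hs⟩; cases (reachIn_zero hr); exact ⟨b, hs, rfl⟩
  | succ m ih =>
    intro a b
    constructor
    · rintro ⟨c, hs, hr⟩
      obtain ⟨e, hre, hse⟩ := (ih c b).mp hr
      exact ⟨e, ⟨c, hs, hre⟩, hse⟩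
    · rintro ⟨c, hr, hs⟩
      obtain ⟨e, hse, hre⟩ := hr
      exact ⟨e, hse, (ih e b).mpr ⟨c, hre, hs⟩⟩

lemma cowStep_lower {v w : Int} (hv : 0 ≤ v) (h : cowStep v w) : 0 ≤ w ∧ v - 1 ≤ w := by
  rcases h with ⟨h1, h2⟩ | ⟨h1, h2⟩ | ⟨h1, h2⟩ <;> omega

lemma cowStep_upper {v w B : Int} (hB : 100000 ≤ B) (hv : v ≤ B) (h : cowStep v w) :
    w ≤ B := by
  rcases h with ⟨h1, h2⟩ | ⟨h1, h2⟩ | ⟨h1, h2⟩ <;> omega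

lemma reach_bounds : ∀ (n : Nat) (a b B : Int), 0 ≤ a → a ≤ B → 100000 ≤ B →
    reachIn n a b → 0 ≤ b ∧ b ≤ B := by
  intro n
  induction n with
  | zero => intro a b B h0 h1 h2 hr; cases (reachIn_zero hr); exact ⟨h0, h1⟩
  | succ m ih =>
    rintro a b B h0 h1 h2 ⟨c, hs, hr⟩
    obtain ⟨hc0, _⟩ := cowStep_lower h0 hs
    exact ih c b B hc0 (cowStep_upper h2 h1 hs) h2 hr

lemma reach_lower : ∀ (n : Nat) (a b : Int), 0 ≤ a → reachIn n a b → a - n ≤ b := by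
  intro n
  induction n with
  | zero => intro a b h0 hr; cases (reachIn_zero hr); omega
  | succ m ih =>
    rintro a b h0 ⟨c, hs, hr⟩
    obtain ⟨hc0, hc1⟩ := cowStep_lower h0 hs
    have := ih c b hc0 hr
    push_cast
    push_cast at this
    omega

lemma reach_down : ∀ (n : Nat) (a b : Int), 0 ≤ b → b ≤ a → a - b = n → reachIn n a b := by
  intro n
  induction n with
  | zero => intro a b _ _ h; have : a = b := by omega
            exact this
  | succ m ih =>
    intro a b h0 h1 h2
    exact ⟨a - 1, Or.inl ⟨rfl, by omega⟩, ih (a - 1) b h0 (by omega) (by omega)⟩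

lemma reach_up : ∀ (n : Nat) (a b : Int), a ≤ b → b ≤ 100000 → b - a = n → reachIn n a b := by
  intro n
  induction n with
  | zero => intro a b _ _ _h; have : a = b := by omega
            exact this
  | succ m ih =>
    intro a b h0 h1 h2
    exact ⟨a + 1, Or.inr (Or.inl ⟨rfl, by omega⟩), ih (a + 1) b (by omega) h1 (by omega)⟩

lemma cowDist_le {a b : Int} {n : Nat} (h : reachIn n a b) : cowDist a b ≤ n :=
  Nat.sInf_le h

lemma reachIn_cowDist {a b : Int} (h : cowReach a b) : reachIn (cowDist a b) a b :=
  Nat.sInf_mem h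

lemma cowDist_self (a : Int) : cowDist a a = 0 :=
  Nat.le_zero.mp (cowDist_le (reachIn_self a))

lemma cowDist_eq_zero {a b : Int} (h : cowReach a b) (h0 : cowDist a b = 0) : a = b := by
  have := reachIn_cowDist h
  rw [h0] at this
  exact this

lemma reach_edge {a b c : Int} (h : cowReach a b) (hs : cowStep b c) :
    cowReach a c ∧ cowDist a c ≤ cowDist a b + 1 := by
  have h1 : reachIn (cowDist a b + 1) a c :=
    (reachIn_snoc _ _ _).mpr ⟨b, reachIn_cowDist h, hs⟩
  exact ⟨⟨_, h1⟩, cowDist_le h1⟩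

lemma cowDist_down {a b : Int} (h0 : 0 ≤ b) (h1 : b ≤ a) : cowDist a b = (a - b).toNat := by
  have hr : reachIn (a - b).toNat a b := reach_down _ a b h0 h1 (by omega)
  have hle := cowDist_le hr
  have hlo := reach_lower (cowDist a b) a b (by omega) (reachIn_cowDist ⟨_, hr⟩)
  omega

lemma not_reach {a b : Int} (h0 : 0 ≤ a) (h : b < 0 ∨ (100000 < b ∧ a < b)) :
    ¬ cowReach a b := by
  rintro ⟨n, hn⟩
  have := reach_bounds n a b (max a 100000) h0 (le_max_left _ _) (le_max_right _ _) hn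
  rcases h with h | h <;> omega

lemma reach_board {a b : Int} (_h0 : 0 ≤ a) (hb0 : 0 ≤ b) (hb1 : b ≤ 100000) :
    cowReach a b := by
  by_cases h : b ≤ a
  · exact ⟨_, reach_down (a - b).toNat a b hb0 h (by omega)⟩
  · exact ⟨_, reach_up (b - a).toNat a b (by omega) hb1 (by omega)⟩

lemma closed_reach {P : Int → Prop} (hP : ∀ v w, P v → cowStep v w → P w) :
    ∀ (n : Nat) (a b : Int), P a → reachIn n a b → P b := by
  intro n
  induction n with
  | zero => intro a b ha hr; cases (reachIn_zero hr); exact ha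
  | succ m ih => rintro a b ha ⟨c, hs, hr⟩; exact ih c b (hP a c ha hs) hr

-- Characterization of cowDist by the backward recursion (B's algorithm)

lemma dist_le_sub {N K : Int} (_hN : 0 ≤ N) (h1 : N ≤ K) (h2 : K ≤ 100000) :
    (cowDist N K : Int) ≤ K - N := by
  have := cowDist_le (reach_up (K - N).toNat N K h1 h2 (by omega))
  omega

lemma lb_even (N : Int) (hN : 0 ≤ N) : ∀ (n : Nat), ∀ (K : Int), N < K → K ≤ 100000 →
    K % 2 = 0 → reachIn n N K →
    min (K - N) (1 + (cowDist N (K / 2) : Int)) ≤ (n : Int) := by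
  intro n
  induction n using Nat.strong_induction_on with
  | _ n ih =>
    intro K hNK hKM hKe hr
    match n, hr with
    | 0, hr => exact absurd (reachIn_zero hr) (by omega)
    | m + 1, hr =>
      obtain ⟨c, hrc, hs⟩ := (reachIn_snoc m N K).mp hr
      have hcb := reach_bounds m N c 100000 hN (by omega) le_rfl hrc
      rcases hs with ⟨he, hge⟩ | ⟨he, hle⟩ | ⟨he, hle⟩
      · -- c = K + 1, odd
        have hcK : c = K + 1 := by omega
        have hm1 : m ≠ 0 := by
          intro h; subst h; have := reachIn_zero hrc; omega
        obtain ⟨m', rfl⟩ : ∃ m', m = m' + 1 := ⟨m - 1, by omega⟩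
        obtain ⟨c2, hrc2, hs2⟩ := (reachIn_snoc m' N c).mp hrc
        have hc2b := reach_bounds m' N c2 100000 hN (by omega) le_rfl hrc2
        rcases hs2 with ⟨he2, hge2⟩ | ⟨he2, hle2⟩ | ⟨he2, hle2⟩
        · -- c2 = c + 1 = K + 2
          have hc2 : c2 = K + 2 := by omega
          subst hc2
          have hih := ih m' (by omega) (K + 2) (by omega) (by omega) (by omega) hrc2
          have hlip : cowDist N (K / 2) ≤ cowDist N ((K + 2) / 2) + 1 := by
            have hre : cowReach N ((K + 2) / 2) := reach_board hN (by omega) (by omega)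
            have hstep : cowStep ((K + 2) / 2) (K / 2) :=
              Or.inl ⟨by omega, by omega⟩
            exact (reach_edge hre hstep).2
          rcases min_cases (K + 2 - N) (1 + (cowDist N ((K + 2) / 2) : Int)) with ⟨hmin, _⟩ | ⟨hmin, _⟩
          · exact le_trans (min_le_left _ _) (by omega)
          · exact le_trans (min_le_right _ _) (by omega)
        · -- c2 = c - 1 = K
          have hc2 : c2 = K := by omega
          rw [hc2] at hrc2
          have := ih m' (by omega) K hNK hKM hKe hrc2
          omega
        · -- c = 2 * c2 : impossible, c odd
          omega
      · -- c = K - 1, odd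
        have hcK : c = K - 1 := by omega
        by_cases hcN : c = N
        · -- K = N + 1
          exact le_trans (min_le_left _ _) (by omega)
        · have hm1 : m ≠ 0 := by
            intro h; subst h; have := reachIn_zero hrc; omega
          obtain ⟨m', rfl⟩ : ∃ m', m = m' + 1 := ⟨m - 1, by omega⟩
          obtain ⟨c2, hrc2, hs2⟩ := (reachIn_snoc m' N c).mp hrc
          have hc2b := reach_bounds m' N c2 100000 hN (by omega) le_rfl hrc2
          rcases hs2 with ⟨he2, hge2⟩ | ⟨he2, hle2⟩ | ⟨he2, hle2⟩
          · -- c2 = c + 1 = K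
            have hc2 : c2 = K := by omega
            rw [hc2] at hrc2
            have := ih m' (by omega) K hNK hKM hKe hrc2
            omega
          · -- c2 = c - 1 = K - 2
            have hc2 : c2 = K - 2 := by omega
            subst hc2
            by_cases hKN : K - 2 ≤ N
            · -- then N = K - 2, and K - N = 2 ≤ n
              exact le_trans (min_le_left _ _) (by omega)
            · have hih := ih m' (by omega) (K - 2) (by omega) (by omega) (by omega) hrc2
              have hlip : cowDist N (K / 2) ≤ cowDist N ((K - 2) / 2) + 1 := by
                have hre : cowReach N ((K - 2) / 2) := reach_board hN (by omega) (by omega)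
                have hstep : cowStep ((K - 2) / 2) (K / 2) :=
                  Or.inr (Or.inl ⟨by omega, by omega⟩)
                exact (reach_edge hre hstep).2
              rcases min_cases (K - 2 - N) (1 + (cowDist N ((K - 2) / 2) : Int)) with ⟨hmin, _⟩ | ⟨hmin, _⟩
              · exact le_trans (min_le_left _ _) (by omega)
              · exact le_trans (min_le_right _ _) (by omega)
          · -- c = 2 * c2 : impossible, c odd
            omega
      · -- K = 2 * c : the doubling case
        have hc : c = K / 2 := by omega
        subst hc
        have := cowDist_le hrc
        exact le_trans (min_le_right _ _) (by omega)

lemma dist_even {N K : Int} (hN : 0 ≤ N) (hNK : N < K) (hKM : K ≤ 100000) (hKe : K % 2 = 0) :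
    (cowDist N K : Int) = min (K - N) (1 + (cowDist N (K / 2) : Int)) := by
  have hR : cowReach N K := reach_board hN (by omega) hKM
  have hlb := lb_even N hN (cowDist N K) K hNK hKM hKe (reachIn_cowDist hR)
  have hub1 : (cowDist N K : Int) ≤ K - N := dist_le_sub hN (by omega) hKM
  have hub2 : cowDist N K ≤ cowDist N (K / 2) + 1 := by
    have hre : cowReach N (K / 2) := reach_board hN (by omega) (by omega)
    have hstep : cowStep (K / 2) K := Or.inr (Or.inr ⟨by omega, hKM⟩)
    exact (reach_edge hre hstep).2
  rcases min_cases (K - N) (1 + (cowDist N (K / 2) : Int)) with ⟨hmin, _⟩ | ⟨hmin, _⟩ <;> omega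

lemma dist_odd {N K : Int} (hN : 0 ≤ N) (hNK : N < K) (hKM : K ≤ 100000) (hKo : K % 2 = 1) :
    (cowDist N K : Int) = 1 + min ((cowDist N (K - 1) : Int)) ((cowDist N (K + 1) : Int)) := by
  have hR : cowReach N K := reach_board hN (by omega) hKM
  have hub1 : cowDist N K ≤ cowDist N (K - 1) + 1 := by
    have hre : cowReach N (K - 1) := reach_board hN (by omega) (by omega)
    exact (reach_edge hre (Or.inr (Or.inl ⟨by omega, hKM⟩))).2
  have hub2 : cowDist N K ≤ cowDist N (K + 1) + 1 := by
    have hre : cowReach N (K + 1) := reach_board hN (by omega) (by omega)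
    exact (reach_edge hre (Or.inl ⟨by omega, by omega⟩)).2
  have hpos : cowDist N K ≠ 0 := fun h => by have := cowDist_eq_zero hR h; omega
  obtain ⟨m, hm⟩ : ∃ m, cowDist N K = m + 1 := ⟨cowDist N K - 1, by omega⟩
  have hr := reachIn_cowDist hR
  rw [hm] at hr
  obtain ⟨c, hrc, hs⟩ := (reachIn_snoc m N K).mp hr
  have hlo : cowDist N (K - 1) ≤ m ∨ cowDist N (K + 1) ≤ m := by
    rcases hs with ⟨he, hge⟩ | ⟨he, hle⟩ | ⟨he, hle⟩
    · right; have : c = K + 1 := by omega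
      subst this; exact cowDist_le hrc
    · left; have : c = K - 1 := by omega
      subst this; exact cowDist_le hrc
    · omega
  rcases min_cases ((cowDist N (K - 1) : Int)) ((cowDist N (K + 1) : Int)) with ⟨hmin, _⟩ | ⟨hmin, _⟩ <;> omega

-- B's recursion computes cowDist

lemma cost_eq (N : Int) (hN : 0 ≤ N) : ∀ (fuel : Nat) (K : Int), N < K → K ≤ 100000 →
    K.toNat < fuel → cowCost N fuel K = (cowDist N K : Int) := by
  intro fuel
  induction fuel with
  | zero => intro K _ _ h; omega
  | succ fuel ih =>
    intro K hNK hKM hfuel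
    have hmod : PySem.Int.mod K 2 = K % 2 := PySem.Int.mod_eq_emod_of_pos (by norm_num)
    have hdiv : PySem.Int.floordiv K 2 = K / 2 := PySem.Int.floordiv_eq_ediv_of_pos (by norm_num)
    have hdiv1 : PySem.Int.floordiv (K + 1) 2 = (K + 1) / 2 := PySem.Int.floordiv_eq_ediv_of_pos (by norm_num)
    simp only [cowCost]
    rw [if_neg (by omega : ¬ K ≤ N)]
    by_cases hK1 : K = 1
    · rw [if_pos hK1]
      subst hK1
      have hN0 : N = 0 := by omega
      subst hN0
      rw [dist_odd (by omega) (by omega) (by omega) (by omega)]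
      simp only [show (1:Int) - 1 = 0 by norm_num]
      rw [cowDist_self]
      rcases min_cases ((cowDist 0 0 : Int)) ((cowDist 0 (1 + 1) : Int)) with ⟨hmin, _⟩ | ⟨hmin, _⟩ <;>
        · rw [cowDist_self] at * ; omega
    · rw [if_neg hK1, hmod, hdiv, hdiv1]
      by_cases hKe : K % 2 = 0
      · rw [if_pos hKe]
        have hhalf : cowCost N fuel (K / 2) = (cowDist N (K / 2) : Int) := by
          by_cases hh : K / 2 ≤ N
          · obtain ⟨f, rfl⟩ : ∃ f, fuel = f + 1 := ⟨fuel - 1, by omega⟩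
            simp only [cowCost]
            rw [if_pos hh, cowDist_down (by omega) hh]
            omega
          · exact ih (K / 2) (by omega) (by omega) (by omega)
        rw [hhalf, dist_even hN hNK hKM hKe]
      · rw [if_neg hKe]
        have hKo : K % 2 = 1 := by omega
        have hK3 : 3 ≤ K := by omega
        have hc1 : cowCost N fuel (K - 1) = (cowDist N (K - 1) : Int) := by
          by_cases hh : K - 1 ≤ N
          · obtain ⟨f, rfl⟩ : ∃ f, fuel = f + 1 := ⟨fuel - 1, by omega⟩
            simp only [cowCost]
            rw [if_pos hh, cowDist_down (by omega) hh]
            omega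
          · exact ih (K - 1) (by omega) (by omega) (by omega)
        have hc2 : cowCost N fuel ((K + 1) / 2) = (cowDist N ((K + 1) / 2) : Int) := by
          by_cases hh : (K + 1) / 2 ≤ N
          · obtain ⟨f, rfl⟩ : ∃ f, fuel = f + 1 := ⟨fuel - 1, by omega⟩
            simp only [cowCost]
            rw [if_pos hh, cowDist_down (by omega) hh]
            omega
          · exact ih ((K + 1) / 2) (by omega) (by omega) (by omega)
        rw [hc1, hc2, dist_odd hN hNK hKM hKo]
        have hplus := dist_even hN (by omega : N < K + 1) (by omega : K + 1 ≤ 100000) (by omega : (K + 1) % 2 = 0)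
        have hd1 : (cowDist N (K - 1) : Int) ≤ K - 1 - N := dist_le_sub hN (by omega) (by omega)
        rcases min_cases ((cowDist N (K - 1) : Int)) (1 + (cowDist N ((K + 1) / 2) : Int)) with ⟨hm1, hm1'⟩ | ⟨hm1, hm1'⟩ <;>
          rcases min_cases ((cowDist N (K - 1) : Int)) ((cowDist N (K + 1) : Int)) with ⟨hm2, hm2'⟩ | ⟨hm2, hm2'⟩ <;>
            rcases min_cases (K + 1 - N) (1 + (cowDist N ((K + 1) / 2) : Int)) with ⟨hm3, hm3'⟩ | ⟨hm3, hm3'⟩ <;>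
              omega

-- Result characterization shared by both ports
def cowAns (N K r : Int) : Prop :=
  (cowReach N K ∧ r = (cowDist N K : Int)) ∨ (¬ cowReach N K ∧ r = -1)

lemma cowAns_unique {N K r s : Int} (hr : cowAns N K r) (hs : cowAns N K s) : r = s := by
  rcases hr with ⟨h1, h2⟩ | ⟨h1, h2⟩ <;> rcases hs with ⟨h3, h4⟩ | ⟨h3, h4⟩
  · rw [h2, h4]
  · exact absurd h1 h3
  · exact absurd h3 h1
  · rw [h2, h4]

-- B's top level in terms of reachability and distance
lemma alt_ans (N K : Int) (hN : 0 ≤ N) : cowAns N K (catch_that_cow_alt N K) := by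
  unfold catch_that_cow_alt
  by_cases h1 : 0 ≤ K ∧ K ≤ N
  · rw [if_pos h1]
    refine Or.inl ⟨⟨_, reach_down (N - K).toNat N K h1.1 h1.2 (by omega)⟩, ?_⟩
    rw [cowDist_down h1.1 h1.2]
    omega
  · rw [if_neg h1]
    by_cases h2 : K < 0 ∨ 100000 < K
    · rw [if_pos h2]
      refine Or.inr ⟨?_, rfl⟩
      rcases h2 with h2 | h2
      · exact not_reach hN (Or.inl h2)
      · exact not_reach hN (Or.inr ⟨h2, by omega⟩)
    · rw [if_neg h2]
      have hNK : N < K := by omega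
      have hKM : K ≤ 100000 := by omega
      exact Or.inl ⟨reach_board hN (by omega) hKM,
        cost_eq N hN (K.toNat + 1) K hNK hKM (by omega)⟩

-- ---- A-side: the BFS loop invariant ----

def qNodes (q : List (Int × Int)) : List Int := q.map Prod.fst

-- membership in the visited map, after one more insert
lemma contains_insert_iff (V : Std.HashMap Int Bool) (v w : Int) (x : Bool) :
    (V.insert w x).contains v = true ↔ v = w ∨ V.contains v = true := by
  rw [Std.HashMap.contains_insert, Bool.or_eq_true, beq_iff_eq]
  constructor
  · rintro (h | h)
    · exact Or.inl h.symm
    · exact Or.inr h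
  · rintro (h | h)
    · exact Or.inl h.symm
    · exact Or.inr h

lemma contains_mono {V : Std.HashMap Int Bool} {v : Int} (w : Int) (x : Bool)
    (h : V.contains v = true) : (V.insert w x).contains v = true :=
  (contains_insert_iff V v w x).mpr (Or.inr h)

lemma contains_insert_self (V : Std.HashMap Int Bool) (w : Int) (x : Bool) :
    (V.insert w x).contains w = true :=
  (contains_insert_iff V w w x).mpr (Or.inl rfl)

lemma size_insert_fresh (V : Std.HashMap Int Bool) {w : Int} (x : Bool)
    (h : V.contains w = false) : (V.insert w x).size = V.size + 1 := by
  rw [Std.HashMap.size_insert, if_neg]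
  rw [Std.HashMap.mem_iff_contains]
  simp [h]

-- the three guards of A are exactly the edge relation (for a nonnegative position)
lemma step_down_iff {idx : Int} (h : 0 ≤ idx) : cowStep idx (idx - 1) ↔ 0 ≤ idx - 1 := by
  unfold cowStep
  constructor
  · rintro (⟨h1, h2⟩ | ⟨h1, h2⟩ | ⟨h1, h2⟩) <;> omega
  · intro h1; exact Or.inl ⟨rfl, h1⟩

lemma step_up_iff {idx : Int} (_h : 0 ≤ idx) : cowStep idx (idx + 1) ↔ idx + 1 ≤ 100000 := by
  unfold cowStep
  constructor
  · rintro (⟨h1, h2⟩ | ⟨h1, h2⟩ | ⟨h1, h2⟩) <;> omega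
  · intro h1; exact Or.inr (Or.inl ⟨rfl, h1⟩)

lemma step_double_iff {idx : Int} (h : 0 ≤ idx) : cowStep idx (2 * idx) ↔ 2 * idx ≤ 100000 := by
  unfold cowStep
  constructor
  · rintro (⟨h1, h2⟩ | ⟨h1, h2⟩ | ⟨h1, h2⟩) <;> omega
  · intro h1; exact Or.inr (Or.inr ⟨rfl, h1⟩)

lemma step_cases {idx w : Int} (h : cowStep idx w) :
    w = idx - 1 ∨ w = idx + 1 ∨ w = 2 * idx := by
  rcases h with ⟨h1, _⟩ | ⟨h1, _⟩ | ⟨h1, _⟩ <;> omega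

-- invariant during the expansion of the popped node `idx` (level d);
-- L is a ghost list of the visited keys (for the size/termination argument)
structure MidInv (N K idx d : Int) (q : List (Int × Int)) (V : Std.HashMap Int Bool)
    (L : List Int) : Prop where
  memN : V.contains N = true
  qsub : ∀ p ∈ q, V.contains p.1 = true
  qnodup : (qNodes q).Nodup
  miff : ∀ v, V.contains v = true ↔ v ∈ L
  lnodup : L.Nodup
  hsize : V.size = L.length
  vsound : ∀ v, V.contains v = true → cowReach N v ∧ 0 ≤ v ∧ v ≤ max N 100000
  qdist : ∀ p ∈ q, p.2 = (cowDist N p.1 : Int)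
  qlab : ∀ p ∈ q, p.2 = d ∨ p.2 = d + 1
  qsorted : (q.map Prod.snd).Pairwise (· ≤ ·)
  kfresh : V.contains K = true → K ∈ qNodes q
  lev : ∀ v, cowReach N v → (cowDist N v : Int) ≤ d → V.contains v = true
  idxmem : V.contains idx = true
  idxq : idx ∉ qNodes q
  closx : ∀ v, V.contains v = true → v ∉ qNodes q → v ≠ idx → ∀ w, cowStep v w → V.contains w = true

-- the invariant of the BFS loop state (no node being expanded)
structure CowInv (N K d : Int) (q : List (Int × Int)) (V : Std.HashMap Int Bool)
    (L : List Int) : Prop where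
  memN : V.contains N = true
  qsub : ∀ p ∈ q, V.contains p.1 = true
  qnodup : (qNodes q).Nodup
  miff : ∀ v, V.contains v = true ↔ v ∈ L
  lnodup : L.Nodup
  hsize : V.size = L.length
  vsound : ∀ v, V.contains v = true → cowReach N v ∧ 0 ≤ v ∧ v ≤ max N 100000
  qdist : ∀ p ∈ q, p.2 = (cowDist N p.1 : Int)
  qlab : ∀ p ∈ q, p.2 = d ∨ p.2 = d + 1
  qsorted : (q.map Prod.snd).Pairwise (· ≤ ·)
  qhead : ∀ p ∈ q.head?, p.2 = d
  kfresh : V.contains K = true → K ∈ qNodes q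
  clos : ∀ v, V.contains v = true → v ∉ qNodes q → ∀ w, cowStep v w → V.contains w = true
  frontier : ∀ v, cowReach N v → (cowDist N v : Int) < d → V.contains v = true

-- every node of distance ≤ d is already visited when level d is being expanded
lemma levelup {N K d : Int} {q V L} (h : CowInv N K d q V L) :
    ∀ v, cowReach N v → (cowDist N v : Int) ≤ d → V.contains v = true := by
  intro v hr hd
  by_cases hlt : (cowDist N v : Int) < d
  · exact h.frontier v hr hlt
  · by_cases hv0 : cowDist N v = 0
    · have hNv := cowDist_eq_zero hr hv0
      rw [← hNv]
      exact h.memN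
    · obtain ⟨m, hm⟩ : ∃ m, cowDist N v = m + 1 := ⟨cowDist N v - 1, by omega⟩
      have hrr := reachIn_cowDist hr
      rw [hm] at hrr
      obtain ⟨u, hru, hsu⟩ := (reachIn_snoc m N v).mp hrr
      have hud : cowDist N u ≤ m := cowDist_le hru
      have humem : V.contains u = true := h.frontier u ⟨m, hru⟩ (by omega)
      have hunotq : u ∉ qNodes q := by
        intro hu
        obtain ⟨p, hp, hpe⟩ := List.mem_map.mp hu
        have h1 := h.qdist p hp
        have h2 := h.qlab p hp
        rw [hpe] at h1
        omega
      exact h.clos u humem hunotq v hsu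

-- one guarded push preserves the mid-expansion invariant
lemma push_case {N K idx d : Int} {q : List (Int × Int)} {V : Std.HashMap Int Bool}
    {L : List Int} (G : Prop) [Decidable G] (w : Int)
    (h : MidInv N K idx d q V L)
    (hidx0 : 0 ≤ idx) (hidxB : idx ≤ max N 100000)
    (hidxd : (cowDist N idx : Int) = d)
    (hG : G ↔ cowStep idx w) :
    ∃ L', MidInv N K idx d (cowPush q V G w (d + 1)).1 (cowPush q V G w (d + 1)).2 L' ∧
    (cowStep idx w → (cowPush q V G w (d + 1)).2.contains w = true) ∧
    ∃ k ≤ 1, (cowPush q V G w (d + 1)).1.length = q.length + k ∧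
      (cowPush q V G w (d + 1)).2.size = V.size + k := by
  unfold cowPush
  by_cases hC : G ∧ V.contains w = false
  · rw [if_pos hC]
    obtain ⟨hg, hfresh⟩ := hC
    have hstep : cowStep idx w := hG.mp hg
    have hreachidx : cowReach N idx := (h.vsound idx h.idxmem).1
    obtain ⟨hwreach, hwdle⟩ := reach_edge hreachidx hstep
    have hw0 : 0 ≤ w := (cowStep_lower hidx0 hstep).1
    have hwB : w ≤ max N 100000 := cowStep_upper (le_max_right N 100000) hidxB hstep
    have hwd : (cowDist N w : Int) = d + 1 := by
      have hge : ¬ ((cowDist N w : Int) ≤ d) := by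
        intro hle
        rw [h.lev w hwreach hle] at hfresh
        exact absurd hfresh (by simp)
      omega
    have hwnotq : w ∉ qNodes q := by
      intro hq
      obtain ⟨p, hp, hpe⟩ := List.mem_map.mp hq
      have hc := h.qsub p hp
      rw [hpe] at hc
      rw [hc] at hfresh
      exact absurd hfresh (by simp)
    have hwneidx : w ≠ idx := by
      intro he
      rw [he, h.idxmem] at hfresh
      exact absurd hfresh (by simp)
    have hwnotL : w ∉ L := by
      intro hmem
      rw [← h.miff w] at hmem
      rw [hmem] at hfresh
      exact absurd hfresh (by simp)
    refine ⟨w :: L, ?_, fun _ => contains_insert_self V w true, 1, le_rfl, by simp,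
      size_insert_fresh V true hfresh⟩
    refine { memN := contains_mono w true h.memN, qsub := ?qsub, qnodup := ?qnodup,
             miff := ?miff, lnodup := ?lnodup, hsize := ?hsize,
             vsound := ?vsound, qdist := ?qdist, qlab := ?qlab,
             qsorted := ?qsorted, kfresh := ?kfresh, lev := ?lev, idxmem := ?idxmem,
             idxq := ?idxq, closx := ?closx }
    case qsub =>
      intro p hp
      rcases List.mem_append.mp hp with hp | hp
      · exact contains_mono w true (h.qsub p hp)
      · rw [List.mem_singleton.mp hp]
        exact contains_insert_self V w true
    case qnodup =>
      have : qNodes (q ++ [(w, d + 1)]) = qNodes q ++ [w] := by simp [qNodes]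
      rw [this, List.nodup_append]
      refine ⟨h.qnodup, by simp, ?_⟩
      intro a ha b hb
      rw [List.mem_singleton.mp hb]
      intro hae
      rw [← hae] at hwnotq
      exact hwnotq ha
    case miff =>
      intro v
      rw [contains_insert_iff V v w true, h.miff v, List.mem_cons]
    case lnodup => exact List.nodup_cons.mpr ⟨hwnotL, h.lnodup⟩
    case hsize =>
      rw [size_insert_fresh V true hfresh, h.hsize]
      simp
    case vsound =>
      intro v hv
      rcases (contains_insert_iff V v w true).mp hv with rfl | hv
      · exact ⟨hwreach, hw0, hwB⟩
      · exact h.vsound v hv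
    case qdist =>
      intro p hp
      rcases List.mem_append.mp hp with hp | hp
      · exact h.qdist p hp
      · rw [List.mem_singleton.mp hp]
        exact hwd.symm
    case qlab =>
      intro p hp
      rcases List.mem_append.mp hp with hp | hp
      · exact h.qlab p hp
      · rw [List.mem_singleton.mp hp]
        exact Or.inr rfl
    case qsorted =>
      have : (q ++ [(w, d + 1)]).map Prod.snd = q.map Prod.snd ++ [d + 1] := by simp
      rw [this, List.pairwise_append]
      refine ⟨h.qsorted, by simp, ?_⟩
      intro a ha b hb
      rw [List.mem_singleton.mp hb]
      obtain ⟨p, hp, hpe⟩ := List.mem_map.mp ha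
      rcases h.qlab p hp with h1 | h1 <;> omega
    case kfresh =>
      intro hv
      rcases (contains_insert_iff V K w true).mp hv with rfl | hv
      · simp [qNodes]
      · have := h.kfresh hv
        simp only [qNodes, List.map_append] at *
        exact List.mem_append.mpr (Or.inl this)
    case lev => intro v hr hd'; exact contains_mono w true (h.lev v hr hd')
    case idxmem => exact contains_mono w true h.idxmem
    case idxq =>
      have : qNodes (q ++ [(w, d + 1)]) = qNodes q ++ [w] := by simp [qNodes]
      rw [this]
      intro hmem
      rcases List.mem_append.mp hmem with hmem | hmem
      · exact h.idxq hmem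
      · exact hwneidx (List.mem_singleton.mp hmem).symm
    case closx =>
      intro v hv hvq hvne w' hs
      rcases (contains_insert_iff V v w true).mp hv with rfl | hv
      · exfalso
        apply hvq
        simp [qNodes]
      · refine contains_mono w true (h.closx v hv ?_ hvne w' hs)
        intro hmem
        apply hvq
        simp only [qNodes, List.map_append]
        exact List.mem_append.mpr (Or.inl hmem)
  · rw [if_neg hC]
    refine ⟨L, h, ?_, 0, by omega, by simp, by simp⟩
    intro hstep
    have hg : G := hG.mpr hstep
    rcases Bool.eq_false_or_eq_true (V.contains w) with h1 | h1
    · exact h1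
    · exact absurd ⟨hg, h1⟩ hC

lemma contains_cowPush_mono {V : Std.HashMap Int Bool} {v : Int}
    (q : List (Int × Int)) (G : Prop) [Decidable G] (w lab : Int)
    (h : V.contains v = true) : (cowPush q V G w lab).2.contains v = true := by
  unfold cowPush
  split_ifs with hc
  · exact contains_mono w true h
  · exact h

-- popping (idx, s) from a clean level-d state gives the mid-expansion invariant
lemma pop_mid {N K idx s d : Int} {rest : List (Int × Int)} {V : Std.HashMap Int Bool}
    {L : List Int} (h : CowInv N K d ((idx, s) :: rest) V L) (hik : idx ≠ K) :
    MidInv N K idx d rest V L ∧ s = d ∧ (cowDist N idx : Int) = d ∧ 0 ≤ idx ∧ idx ≤ max N 100000 := by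
  have hs : s = d := h.qhead (idx, s) (by simp)
  have hm : V.contains idx = true := h.qsub (idx, s) (by simp)
  have hd : s = (cowDist N idx : Int) := h.qdist (idx, s) (by simp)
  have hb := h.vsound idx hm
  have hnodup : (idx :: qNodes rest).Nodup := by
    have : qNodes ((idx, s) :: rest) = idx :: qNodes rest := by simp [qNodes]
    rw [← this]; exact h.qnodup
  refine ⟨?_, hs, by omega, hb.2.1, hb.2.2⟩
  refine { memN := h.memN, qsub := ?_, qnodup := hnodup.of_cons,
           miff := h.miff, lnodup := h.lnodup, hsize := h.hsize,
           vsound := h.vsound, qdist := ?_, qlab := ?_, qsorted := ?_, kfresh := ?_,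
           lev := levelup h, idxmem := hm, idxq := (List.nodup_cons.mp hnodup).1, closx := ?_ }
  · exact fun p hp => h.qsub p (List.mem_cons_of_mem _ hp)
  · exact fun p hp => h.qdist p (List.mem_cons_of_mem _ hp)
  · exact fun p hp => h.qlab p (List.mem_cons_of_mem _ hp)
  · have : ((idx, s) :: rest).map Prod.snd = s :: rest.map Prod.snd := by simp
    have h2 := h.qsorted
    rw [this] at h2
    exact h2.of_cons
  · intro hv
    have hKq := h.kfresh hv
    have he : qNodes ((idx, s) :: rest) = idx :: qNodes rest := by simp [qNodes]
    rw [he] at hKq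
    rcases List.mem_cons.mp hKq with h1 | h1
    · exact absurd h1.symm hik
    · exact h1
  · intro v hv hq hne w hsw
    refine h.clos v hv ?_ w hsw
    simp only [qNodes, List.map_cons, List.mem_cons]
    rintro (h1 | h1)
    · exact hne h1
    · exact hq h1

-- after expanding all three children the clean invariant holds again (at some level)
lemma rebuild {N K idx d : Int} {q : List (Int × Int)} {V : Std.HashMap Int Bool}
    {L : List Int} (h : MidInv N K idx d q V L)
    (hP : ∀ w, cowStep idx w → V.contains w = true) :
    ∃ d', CowInv N K d' q V L := by
  have hclos : ∀ v, V.contains v = true → v ∉ qNodes q → ∀ w, cowStep v w → V.contains w = true := by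
    intro v hv hq w hs
    by_cases hvi : v = idx
    · rw [hvi] at hs; exact hP w hs
    · exact h.closx v hv hq hvi w hs
  rcases q with _ | ⟨p, t⟩
  · refine ⟨d, ?_⟩
    exact { memN := h.memN
            qsub := h.qsub
            qnodup := h.qnodup
            miff := h.miff
            lnodup := h.lnodup
            hsize := h.hsize
            vsound := h.vsound
            qdist := h.qdist
            qlab := h.qlab
            qsorted := h.qsorted
            qhead := by intro p' hp'; simp at hp'
            kfresh := h.kfresh
            clos := hclos
            frontier := fun v hr hd' => h.lev v hr (by omega) }
  · rcases h.qlab p (by simp) with hp | hp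
    · refine ⟨d, ?_⟩
      exact { memN := h.memN
              qsub := h.qsub
              qnodup := h.qnodup
              miff := h.miff
              lnodup := h.lnodup
              hsize := h.hsize
              vsound := h.vsound
              qdist := h.qdist
              qlab := h.qlab
              qsorted := h.qsorted
              qhead := by
                intro p' hp'
                have hpp : p' = p := by simpa [eq_comm] using hp'
                rw [hpp]; exact hp
              kfresh := h.kfresh
              clos := hclos
              frontier := fun v hr hd' => h.lev v hr (by omega) }
    · have hall : ∀ p' ∈ p :: t, p'.2 = d + 1 := by
        intro p' hp'
        rcases List.mem_cons.mp hp' with rfl | hp'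
        · exact hp
        · have hsort := h.qsorted
          have hmap : ((p :: t).map Prod.snd) = p.2 :: t.map Prod.snd := by simp
          rw [hmap] at hsort
          have hle := (List.pairwise_cons.mp hsort).1 p'.2 (List.mem_map_of_mem hp')
          rcases h.qlab p' (List.mem_cons_of_mem _ hp') with h1 | h1 <;> omega
      refine ⟨d + 1, ?_⟩
      exact { memN := h.memN
              qsub := h.qsub
              qnodup := h.qnodup
              miff := h.miff
              lnodup := h.lnodup
              hsize := h.hsize
              vsound := h.vsound
              qdist := h.qdist
              qlab := fun p' hp' => Or.inl (hall p' hp')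
              qsorted := h.qsorted
              qhead := by
                intro p' hp'
                have hpp : p' = p := by simpa [eq_comm] using hp'
                rw [hpp]; exact hall p (by simp)
              kfresh := h.kfresh
              clos := hclos
              frontier := fun v hr hd' => h.lev v hr (by omega) }

-- the visited set never exceeds the board size
lemma ghost_card_le (N : Int) (L : List Int) (hnd : L.Nodup)
    (hb : ∀ v ∈ L, 0 ≤ v ∧ v ≤ max N 100000) :
    L.length ≤ (max N 100000).toNat + 1 := by
  have h1 : L.toFinset.card = L.length := List.toFinset_card_of_nodup hnd
  have h2 : L.toFinset ⊆ Finset.Icc 0 (max N 100000) := by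
    intro v hv
    rw [List.mem_toFinset] at hv
    exact Finset.mem_Icc.mpr (hb v hv)
  have h3 := Finset.card_le_card h2
  rw [Int.card_Icc] at h3
  have hmax : (0:Int) ≤ max N 100000 := le_max_of_le_right (by norm_num)
  omega

-- a drained queue means K is unreachable
lemma empty_ans {N K d : Int} {V : Std.HashMap Int Bool} {L : List Int}
    (h : CowInv N K d [] V L) : cowAns N K (-1) := by
  refine Or.inr ⟨?_, rfl⟩
  rintro ⟨n, hn⟩
  have hKV : V.contains K = true :=
    closed_reach (P := fun v => V.contains v = true)
      (fun v w hv hs => h.clos v hv (by simp [qNodes]) w hs) n N K h.memN hn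
  have := h.kfresh hKV
  simp [qNodes] at this

-- main induction: the BFS loop answers the reachability/distance question
lemma cow_main (N K : Int) : ∀ (fuel : Nat) (q : List (Int × Int)) (V : Std.HashMap Int Bool)
    (L : List Int) (d : Int), CowInv N K d q V L →
    q.length + 4 * (((max N 100000).toNat + 1) - V.size) ≤ fuel →
    cowAns N K (cowLoop fuel q V K) := by
  intro fuel
  induction fuel with
  | zero =>
    intro q V L d h hf
    have hq : q = [] := List.length_eq_zero_iff.mp (by omega)
    subst hq
    exact empty_ans h
  | succ fuel ih =>
    intro q V L d h hf
    rcases q with _ | ⟨⟨idx, s⟩, rest⟩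
    · exact empty_ans h
    · simp only [cowLoop]
      by_cases hik : idx = K
      · rw [if_pos hik]
        have hd := h.qdist (idx, s) (by simp)
        have hm := h.qsub (idx, s) (by simp)
        have hr := (h.vsound idx hm).1
        rw [hik] at hd hr
        exact Or.inl ⟨hr, hd⟩
      · rw [if_neg hik]
        obtain ⟨hmid, hs, hdist, hidx0, hidxB⟩ := pop_mid h hik
        subst hs
        obtain ⟨L1, h1, p1, k1, hk1, hq1, hv1⟩ :=
          push_case (0 ≤ idx - 1) (idx - 1) hmid hidx0 hidxB hdist (step_down_iff hidx0).symm
        obtain ⟨L2, h2, p2, k2, hk2, hq2, hv2⟩ :=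
          push_case (idx + 1 ≤ 100000) (idx + 1) h1 hidx0 hidxB hdist (step_up_iff hidx0).symm
        obtain ⟨L3, h3, p3, k3, hk3, hq3, hv3⟩ :=
          push_case (2 * idx ≤ 100000) (2 * idx) h2 hidx0 hidxB hdist (step_double_iff hidx0).symm
        have hP : ∀ w, cowStep idx w →
            (cowPush (cowPush (cowPush rest V (0 ≤ idx - 1) (idx - 1) (s + 1)).1
              (cowPush rest V (0 ≤ idx - 1) (idx - 1) (s + 1)).2 (idx + 1 ≤ 100000) (idx + 1) (s + 1)).1
              (cowPush (cowPush rest V (0 ≤ idx - 1) (idx - 1) (s + 1)).1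
              (cowPush rest V (0 ≤ idx - 1) (idx - 1) (s + 1)).2 (idx + 1 ≤ 100000) (idx + 1) (s + 1)).2
              (2 * idx ≤ 100000) (2 * idx) (s + 1)).2.contains w = true := by
          intro w hsw
          rcases step_cases hsw with he | he | he <;> subst he
          · exact contains_cowPush_mono _ _ _ _ (contains_cowPush_mono _ _ _ _ (p1 hsw))
          · exact contains_cowPush_mono _ _ _ _ (p2 hsw)
          · exact p3 hsw
        obtain ⟨d', hinv'⟩ := rebuild h3 hP
        apply ih _ _ L3 d' hinv'
        have hcard := ghost_card_le N L3 h3.lnodup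
          (fun v hv => (h3.vsound v ((h3.miff v).mpr hv)).2)
        have hsz := h3.hsize
        simp only [List.length_cons] at hf
        omega

-- the initial BFS state satisfies the invariant at level 0
lemma init_inv (N K : Int) (hN : 0 ≤ N) :
    CowInv N K 0 [(N, 0)] ((∅ : Std.HashMap Int Bool).insert N true) [N] := by
  have hcontains : ∀ v : Int, ((∅ : Std.HashMap Int Bool).insert N true).contains v = true → v = N := by
    intro v hv
    rcases (contains_insert_iff _ v N true).mp hv with h | h
    · exact h
    · rw [Std.HashMap.contains_empty] at h
      exact absurd h (by simp)
  refine { memN := contains_insert_self _ N true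
           qsub := ?_
           qnodup := by simp [qNodes]
           miff := ?_
           lnodup := by simp
           hsize := ?_
           vsound := ?_
           qdist := ?_
           qlab := by intro p hp; rw [List.mem_singleton.mp hp]; exact Or.inl rfl
           qsorted := by simp
           qhead := by intro p hp; rw [(by simpa [eq_comm] using hp : p = (N, 0))]
           kfresh := ?_
           clos := ?_
           frontier := by intro v _ hd; omega }
  · intro p hp
    rw [List.mem_singleton.mp hp]
    exact contains_insert_self _ N true
  · intro v
    constructor
    · intro hv
      rw [hcontains v hv]
      simp
    · intro hv
      rw [List.mem_singleton.mp hv]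
      exact contains_insert_self _ N true
  · rw [size_insert_fresh _ true (Std.HashMap.contains_empty)]
    simp
  · intro v hv
    rw [hcontains v hv]
    exact ⟨⟨0, rfl⟩, hN, le_max_left _ _⟩
  · intro p hp
    rw [List.mem_singleton.mp hp]
    simp [cowDist_self]
  · intro hv
    rw [hcontains K hv]
    simp [qNodes]
  · intro v hv hq
    exact absurd (by rw [hcontains v hv]; simp [qNodes]) hq

theorem catch_that_cow_spec : Claim_equal_catch_that_cow := by
  intro N K _hdom hN
  unfold Spec_catch_that_cow
  have hN' : (0:Int) ≤ N := hN
  have hsize : ((∅ : Std.HashMap Int Bool).insert N true).size = 1 := by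
    rw [size_insert_fresh _ true (Std.HashMap.contains_empty)]
    rw [Std.HashMap.size_empty]
  have hbound : ([(N, (0:Int))].length) + 4 * (((max N 100000).toNat + 1)
      - ((∅ : Std.HashMap Int Bool).insert N true).size) ≤ 4 * ((max N 100000).toNat + 2) := by
    rw [hsize]
    simp only [List.length_singleton]
    omega
  have hans : cowAns N K (catch_that_cow N K) :=
    cow_main N K (4 * ((max N 100000).toNat + 2)) [(N, 0)]
      ((∅ : Std.HashMap Int Bool).insert N true) [N] 0 (init_inv N K hN') hbound
  exact cowAns_unique hans (alt_ans N K hN')
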